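-- pv_equiv track=rewrite | github.com/gift-surg/PySiTK | pysitk/python_helper.py | convert_numbers_to_hyphenated_ranges
-- ===== SOURCE A (Python) =====
-- def convert_numbers_to_hyphenated_ranges(numbers_list):
--     seq = []
--     final = []
--     last = 0
--
--     for index, val in enumerate(sorted(numbers_list)):
--
--         if last + 1 == val or index == 0:
--             seq.append(val)
--             last = val
--         else:
--             if len(seq) > 1:
--                 final.append(str(seq[0]) + '-' + str(seq[len(seq) - 1]))
--             else:
--                 final.append(str(seq[0]))
--             seq = []
--             seq.append(val)
--             last = val
--
--         if index == len(numbers_list) - 1: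
--             if len(seq) > 1:
--                 final.append(str(seq[0]) + '-' + str(seq[len(seq) - 1]))
--             else:
--                 final.append(str(seq[0]))
--
--     final_str = ', '.join(map(str, final))
--     return final_str
-- ===== SOURCE B (Python) =====
-- def convert_numbers_to_hyphenated_ranges(numbers_list):
--     s = sorted(numbers_list)
--     if not s:
--         return ''
--     parts = []
--     i = 0
--     n = len(s)
--     while i < n:
--         j = i
--         while j + 1 < n and s[j + 1] == s[j] + 1:
--             j += 1
--         parts.append(str(s[i]) if i == j else str(s[i]) + '-' + str(s[j]))
--         i = j + 1
--     return ', '.join(parts)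
-- ===== Notes on version B (the rewrite author's own statement) =====
-- stated objective: simpler
-- what changed: A's single pass with a running seq/final/last accumulator and duplicated inline end-of-list flush logic is replaced by an index scan over the sorted list that extracts each maximal consecutive run directly (inner scan to the run's end) and formats it on the spot, with no running state or flush special-casing.
import Mathlib
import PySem

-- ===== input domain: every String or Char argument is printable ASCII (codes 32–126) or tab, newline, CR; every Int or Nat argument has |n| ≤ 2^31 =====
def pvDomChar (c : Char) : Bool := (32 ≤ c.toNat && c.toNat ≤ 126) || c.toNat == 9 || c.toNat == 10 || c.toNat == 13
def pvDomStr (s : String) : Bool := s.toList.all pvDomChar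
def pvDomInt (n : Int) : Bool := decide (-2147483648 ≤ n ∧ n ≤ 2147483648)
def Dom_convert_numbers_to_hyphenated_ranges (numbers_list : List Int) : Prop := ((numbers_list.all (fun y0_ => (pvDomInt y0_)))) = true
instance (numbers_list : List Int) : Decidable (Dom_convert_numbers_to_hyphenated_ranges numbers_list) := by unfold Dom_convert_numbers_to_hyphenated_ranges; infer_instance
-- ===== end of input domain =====

-- B replaces A's running seq/final/last accumulator (with its duplicated inline flush logic)
-- by an index scan that extracts each maximal consecutive run directly (objective: simpler).

-- ===== PORT A =====
-- the flush expression A writes inline three times (seq[0] / seq[len(seq)-1] are only read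
-- when seq is nonempty — always the case in A — so the .getD 0 default is never used)
def flushA (seq : List Int) : String :=
  if 1 < seq.length then
    PySem.Int.toStr ((PySem.List.pyGet? seq 0).getD 0) ++ "-" ++
      PySem.Int.toStr ((PySem.List.pyGet? seq ((seq.length : Int) - 1)).getD 0)
  else PySem.Int.toStr ((PySem.List.pyGet? seq 0).getD 0)

-- loop body of A's for-loop; state = (seq, final, last), iv = (index, val), n = len(numbers_list)
def aBody (n : Int) (st : List Int × List String × Int) (iv : Int × Int) : List Int × List String × Int :=
  match st, iv with
  | (seq, final, last), (index, v) =>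
    match (if last + 1 = v ∨ index = 0 then (seq ++ [v], final, v)
           else ([v], final ++ [flushA seq], v) : List Int × List String × Int) with
    | (seq, final, last) =>
      (seq, (if index = n - 1 then final ++ [flushA seq] else final), last)

def convert_numbers_to_hyphenated_ranges (numbers_list : List Int) : String :=
  let st := (PySem.List.enumerate (PySem.List.sorted numbers_list (fun x => x) false) 0).foldl
    (aBody (numbers_list.length : Int)) ([], [], 0)
  -- map(str, final) on a list of strings is the identity
  PySem.Str.join ", " st.2.1

-- ===== PORT B =====
-- inner while loop of Source B: advance j while s[j+1] == s[j] + 1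
def bInner (s : List Int) (n : Nat) (j : Nat) : Nat :=
  if h : j + 1 < n ∧ PySem.List.pyGetD s ((j : Int) + 1) 0 = PySem.List.pyGetD s (j : Int) 0 + 1 then
    bInner s n (j + 1)
  else j
termination_by n - j
decreasing_by omega

theorem bInner_ge (s : List Int) (n j : Nat) : j ≤ bInner s n j := by
  unfold bInner
  split
  · exact le_trans (by omega) (bInner_ge s n (j + 1))
  · exact le_refl j
termination_by n - j
decreasing_by omega

-- outer while loop of Source B
def bOuter (s : List Int) (n : Nat) (i : Nat) (parts : List String) : List String :=
  if _h : i < n then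
    let j := bInner s n i
    let piece := if i = j then PySem.Int.toStr (PySem.List.pyGetD s (i : Int) 0)
      else PySem.Int.toStr (PySem.List.pyGetD s (i : Int) 0) ++ "-" ++
        PySem.Int.toStr (PySem.List.pyGetD s (j : Int) 0)
    bOuter s n (j + 1) (parts ++ [piece])
  else parts
termination_by n - i
decreasing_by
  have := bInner_ge s n i
  omega

def convert_numbers_to_hyphenated_ranges_alt (numbers_list : List Int) : String :=
  let s := PySem.List.sorted numbers_list (fun x => x) false
  if s = [] then ""
  else PySem.Str.join ", " (bOuter s s.length 0 [])

-- ===== PRECONDITION & SPEC =====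
def Spec_convert_numbers_to_hyphenated_ranges (numbers_list : List Int) (out : String) : Prop := out = convert_numbers_to_hyphenated_ranges_alt numbers_list
instance (numbers_list : List Int) (out : String) : Decidable (Spec_convert_numbers_to_hyphenated_ranges numbers_list out) := by unfold Spec_convert_numbers_to_hyphenated_ranges; infer_instance

-- ===== CLAIM (what is proved, stated in full; the proofs are below) =====
def Claim_equal_convert_numbers_to_hyphenated_ranges : Prop := ∀ (numbers_list : List Int), Dom_convert_numbers_to_hyphenated_ranges numbers_list → Spec_convert_numbers_to_hyphenated_ranges numbers_list (convert_numbers_to_hyphenated_ranges numbers_list)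

-- ===== LEMMAS AND PROOFS =====

-- common characterisation: split off the maximal consecutive run, format, recurse
def fmtR (a b : Int) : String :=
  if a = b then PySem.Int.toStr a else PySem.Int.toStr a ++ "-" ++ PySem.Int.toStr b

def runSplit (last : Int) : List Int → Int × List Int
  | [] => (last, [])
  | y :: ys => if y = last + 1 then runSplit y ys else (last, y :: ys)

theorem runSplit_len (last : Int) (t : List Int) : (runSplit last t).2.length ≤ t.length := by
  induction t generalizing last with
  | nil => simp [runSplit]
  | cons y ys ih =>
    simp only [runSplit]
    split
    · exact le_trans (ih y) (by simp)
    · simp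

def partsOf : List Int → List String
  | [] => []
  | x :: xs => fmtR x (runSplit x xs).1 :: partsOf (runSplit x xs).2
termination_by t => t.length
decreasing_by
  have := runSplit_len x xs
  simp only [List.length_cons]
  omega

theorem partsOf_nil : partsOf [] = [] := by simp [partsOf]

theorem partsOf_cons (x : Int) (xs : List Int) :
    partsOf (x :: xs) = fmtR x (runSplit x xs).1 :: partsOf (runSplit x xs).2 := by
  rw [partsOf]

-- ---------- B side ----------

theorem bInner_spec (s : List Int) (j : Nat) (hj : j < s.length) :
    bInner s s.length j < s.length ∧
    (s.getD (bInner s s.length j) 0 : Int) = s.getD j 0 + ((bInner s s.length j : Int) - (j : Int)) ∧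
    runSplit (s.getD j 0) (s.drop (j + 1)) =
      (s.getD (bInner s s.length j) 0, s.drop (bInner s s.length j + 1)) := by
  unfold bInner
  split
  · rename_i h
    obtain ⟨h1, h2⟩ := h
    rw [show ((j : Int) + 1) = ((j + 1 : Nat) : Int) by push_cast; ring,
      PySem.List.pyGetD_natCast, PySem.List.pyGetD_natCast] at h2
    obtain ⟨ih1, ih2, ih3⟩ := bInner_spec s (j + 1) h1
    refine ⟨ih1, by rw [ih2, h2]; push_cast; ring, ?_⟩
    rw [List.drop_eq_getElem_cons h1]
    simp only [runSplit]
    have hg : s[j + 1] = s.getD j 0 + 1 := by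
      rw [← List.getD_eq_getElem s 0 h1]; exact h2
    rw [if_pos hg]
    rw [List.getD_eq_getElem s 0 h1] at ih3
    exact ih3
  · rename_i h
    refine ⟨hj, by simp, ?_⟩
    rcases Nat.lt_or_ge (j + 1) s.length with h1 | h1
    · rw [List.drop_eq_getElem_cons h1]
      simp only [runSplit]
      rw [if_neg, ← List.drop_eq_getElem_cons h1]
      intro hc
      apply h
      refine ⟨h1, ?_⟩
      rw [show ((j : Int) + 1) = ((j + 1 : Nat) : Int) by push_cast; ring,
        PySem.List.pyGetD_natCast, PySem.List.pyGetD_natCast]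
      rw [← List.getD_eq_getElem s 0 h1] at hc
      exact hc
    · rw [List.drop_eq_nil_of_le h1]
      simp [runSplit]
termination_by s.length - j
decreasing_by omega

theorem bOuter_eq (s : List Int) (i : Nat) (parts : List String) :
    bOuter s s.length i parts = parts ++ partsOf (s.drop i) := by
  unfold bOuter
  split
  · rename_i hi
    obtain ⟨hlt, hgap, hrs⟩ := bInner_spec s i hi
    have hge := bInner_ge s s.length i
    rw [bOuter_eq s (bInner s s.length i + 1) _]
    rw [List.drop_eq_getElem_cons hi, partsOf_cons]
    rw [List.getD_eq_getElem s 0 hi] at hrs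
    rw [hrs]
    simp only [List.append_assoc, List.singleton_append]
    congr 2
    rw [PySem.List.pyGetD_natCast, PySem.List.pyGetD_natCast,
      ← List.getD_eq_getElem s 0 hi]
    unfold fmtR
    by_cases h : i = bInner s s.length i
    · have hv : s.getD i 0 = s.getD (bInner s s.length i) 0 := by omega
      rw [if_pos h, if_pos hv, hv]
    · rw [if_neg h, if_neg (by intro hv; rw [← hv] at hgap; apply h; omega)]
  · rename_i hi
    rw [List.drop_eq_nil_of_le (by omega), partsOf_nil, List.append_nil]
termination_by s.length - i
decreasing_by
  have := bInner_ge s s.length i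
  omega

-- ---------- A side ----------

theorem flushA_singleton (v : Int) : flushA [v] = PySem.Int.toStr v := by
  simp [flushA]

-- A's flush expression on a run seq with head `first` and last element `last`
theorem flushA_eq (seq : List Int) (first last : Int)
    (hne : seq ≠ []) (h0 : seq.getD 0 0 = first)
    (hl : seq.getD (seq.length - 1) 0 = last)
    (hiff : 1 < seq.length ↔ first < last) (hle : first ≤ last) :
    flushA seq = fmtR first last := by
  have hlen : 0 < seq.length := List.length_pos_iff.mpr hne
  have hget0 : (PySem.List.pyGet? seq 0).getD 0 = first := by
    rw [PySem.List.pyGet?_zero, List.getElem?_eq_getElem hlen, Option.getD_some,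
      ← List.getD_eq_getElem seq 0 hlen]
    exact h0
  have hgetl : (PySem.List.pyGet? seq ((seq.length : Int) - 1)).getD 0 = last := by
    have hn : seq.length - 1 < seq.length := by omega
    rw [show ((seq.length : Int) - 1) = ((seq.length - 1 : Nat) : Int) by omega,
      PySem.List.pyGet?_natCast, List.getElem?_eq_getElem hn, Option.getD_some,
      ← List.getD_eq_getElem seq 0 hn]
    exact hl
  unfold flushA fmtR
  by_cases h : 1 < seq.length
  · rw [if_pos h, if_neg (by have := hiff.mp h; omega), hget0, hgetl]
  · rw [if_neg h, if_pos (by have : ¬ first < last := fun hc => h (hiff.mpr hc); omega), hget0]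

-- main invariant of A's loop, entered after the first element with a nonempty current run
theorem aLoop_eq (m : Nat) (t : List Int) (i : Nat) (seq : List Int) (final : List String)
    (first last : Int)
    (hne : seq ≠ []) (h0 : seq.getD 0 0 = first)
    (hl : seq.getD (seq.length - 1) 0 = last)
    (hiff : 1 < seq.length ↔ first < last) (hle : first ≤ last)
    (hi : 1 ≤ i) (hm : i + t.length = m) :
    ((PySem.List.enumerate t (i : Int)).foldl (aBody (m : Int)) (seq, final, last)).2.1 =
      final ++ (if t = [] then [] else
        fmtR first (runSplit last t).1 :: partsOf (runSplit last t).2) := by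
  induction t generalizing i seq final first last with
  | nil => simp [PySem.List.enumerate_nil]
  | cons v t' ih =>
    rw [PySem.List.enumerate_cons, List.foldl_cons]
    have hm' : i + t'.length + 1 = m := by
      simp only [List.length_cons] at hm; omega
    have hidx0 : ¬ ((i : Int) = 0) := by omega
    have hend : ((i : Int) = (m : Int) - 1) ↔ t' = [] := by
      constructor
      · intro h
        have : t'.length = 0 := by omega
        exact List.length_eq_zero_iff.mp this
      · rintro rfl; simp only [List.length_nil] at hm'; omega
    have hlen : 0 < seq.length := List.length_pos_iff.mpr hne
    by_cases hrun : last + 1 = v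
    · -- run continues
      have hA : aBody (m : Int) (seq, final, last) ((i : Int), v) =
          (seq ++ [v],
            (if (i : Int) = (m : Int) - 1 then final ++ [flushA (seq ++ [v])] else final), v) := by
        simp only [aBody]
        rw [if_pos (Or.inl hrun)]
      rw [hA]
      have hfv : first < v := by omega
      have h0' : (seq ++ [v]).getD 0 0 = first := by
        rw [List.getD_eq_getElem _ 0 (by simp only [List.length_append]; omega),
          List.getElem_append_left hlen, ← List.getD_eq_getElem seq 0 hlen]
        exact h0
      have hl' : (seq ++ [v]).getD ((seq ++ [v]).length - 1) 0 = v := by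
        have hidx : (seq ++ [v]).length - 1 = seq.length := by simp
        rw [hidx, List.getD_eq_getElem _ 0 (by simp only [List.length_append, List.length_cons, List.length_nil]; omega), List.getElem_concat_length]
        rfl
      have hiff' : 1 < (seq ++ [v]).length ↔ first < v := by
        simp only [List.length_append, List.length_cons, List.length_nil]
        omega
      have ihx := ih (i + 1) (seq ++ [v]) (if (i : Int) = (m : Int) - 1 then final ++ [flushA (seq ++ [v])] else final) first v (by simp) h0' hl' hiff' (le_of_lt hfv)
        (by omega) (by omega)
      rw [show ((i + 1 : Nat) : Int) = (i : Int) + 1 by push_cast; ring] at ihx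
      rw [ihx]
      have hrs : runSplit last (v :: t') = runSplit v t' := by
        simp [runSplit, hrun.symm]
      rw [if_neg (List.cons_ne_nil v t'), hrs]
      rcases eq_or_ne t' [] with h | h
      · subst h
        rw [if_pos rfl, if_pos (hend.mpr rfl),
          flushA_eq (seq ++ [v]) first v (by simp) h0' hl' hiff' (le_of_lt hfv)]
        simp [runSplit, partsOf_nil]
      · rw [if_neg h, if_neg (fun hc => h (hend.mp hc))]
    · -- gap (or duplicate): flush seq, start new run [v]
      have hA : aBody (m : Int) (seq, final, last) ((i : Int), v) =
          ([v],
            (if (i : Int) = (m : Int) - 1 then (final ++ [flushA seq]) ++ [flushA [v]]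
             else final ++ [flushA seq]), v) := by
        simp only [aBody]
        rw [if_neg (not_or.mpr ⟨hrun, hidx0⟩)]
      rw [hA]
      have ihx := ih (i + 1) [v] (if (i : Int) = (m : Int) - 1 then (final ++ [flushA seq]) ++ [flushA [v]] else final ++ [flushA seq]) v v (by simp) (by simp) (by simp) (by simp) (le_refl v)
        (by omega) (by simp only [List.length_cons] at hm ⊢; omega)
      rw [show ((i + 1 : Nat) : Int) = (i : Int) + 1 by push_cast; ring] at ihx
      rw [ihx]
      have hfl := flushA_eq seq first last hne h0 hl hiff hle
      have hrs : runSplit last (v :: t') = (last, v :: t') := by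
        simp only [runSplit]
        rw [if_neg (fun hc : v = last + 1 => hrun hc.symm)]
      rw [if_neg (List.cons_ne_nil v t'), hrs]
      rcases eq_or_ne t' [] with h | h
      · subst h
        rw [if_pos rfl, if_pos (hend.mpr rfl), hfl, flushA_singleton]
        simp [partsOf_cons, partsOf_nil, runSplit, fmtR]
      · rw [if_neg h, if_neg (fun hc => h (hend.mp hc)), hfl]
        rw [partsOf_cons]
        simp

-- A's whole fold produces exactly partsOf of the sorted list
theorem aFold_eq (s : List Int) (m : Nat) (hm : s.length = m) :
    ((PySem.List.enumerate s 0).foldl (aBody (m : Int)) ([], [], 0)).2.1 = partsOf s := by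
  cases s with
  | nil => simp [PySem.List.enumerate_nil, partsOf_nil]
  | cons v t =>
    rw [PySem.List.enumerate_cons, List.foldl_cons]
    have hm' : t.length + 1 = m := by
      simp only [List.length_cons] at hm; omega
    have hend : ((0 : Int) = (m : Int) - 1) ↔ t = [] := by
      constructor
      · intro h
        have : t.length = 0 := by omega
        exact List.length_eq_zero_iff.mp this
      · rintro rfl; simp only [List.length_nil] at hm'; omega
    have hA : aBody (m : Int) (([], [], 0) : List Int × List String × Int) ((0 : Int), v) =
        ([v], (if (0 : Int) = (m : Int) - 1 then [flushA [v]] else []), v) := by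
      simp [aBody]
    rw [hA]
    have ihx := aLoop_eq m t 1 [v] (if (0 : Int) = (m : Int) - 1 then [flushA [v]] else []) v v (by simp) (by simp) (by simp) (by simp) (le_refl v)
      (le_refl 1) (by omega)
    rw [show ((1 : Nat) : Int) = (1 : Int) by norm_num] at ihx
    rw [show ((0 : Int) + 1) = (1 : Int) by norm_num, ihx]
    rcases eq_or_ne t [] with h | h
    · subst h
      rw [if_pos rfl, if_pos (hend.mpr rfl), flushA_singleton]
      simp [partsOf_cons, partsOf_nil, runSplit, fmtR]
    · rw [if_neg h, if_neg (fun hc => h (hend.mp hc))]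
      rw [partsOf_cons]
      simp

-- ===== VERDICT (by name: the statement is the Claim_ definition above) =====
theorem convert_numbers_to_hyphenated_ranges_spec : Claim_equal_convert_numbers_to_hyphenated_ranges := by
  intro numbers_list _
  unfold Spec_convert_numbers_to_hyphenated_ranges
  simp only [convert_numbers_to_hyphenated_ranges, convert_numbers_to_hyphenated_ranges_alt]
  have hlen : numbers_list.length = (PySem.List.sorted numbers_list (fun x => x) false).length :=
    (PySem.List.length_sorted ..).symm
  rw [hlen, aFold_eq _ _ rfl]
  rcases eq_or_ne (PySem.List.sorted numbers_list (fun x => x) false) [] with h | h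
  · rw [h]
    simp [partsOf_nil, PySem.Str.join]
  · rw [if_neg h, bOuter_eq _ 0 []]
    simp
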